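-- pv_equiv track=rewrite | github.com/AmnesiaBeing/epd_calendar | scripts/font_debug.py | bytes_to_bitmap
-- ===== SOURCE A (Python) =====
-- def bytes_to_bitmap(char_data, char_width, char_height):
--     """
--     将字节数据转换为二维位图
--
--     Args:
--         char_data: 字符的字节数据
--         char_width: 字符宽度
--         char_height: 字符高度
--         char_index: 字符索引
--
--     Returns:
--         list: 二维列表表示的位图，True表示黑色像素
--     """
--     bytes_per_row = (char_width + 7) // 8
--     bitmap = [[False] * char_width for _ in range(char_height)]
--
--     for y in range(char_height):
--         row_start = y * bytes_per_row
--         for x in range(char_width):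
--             byte_index = row_start + x // 8
--             bit_offset = 7 - (x % 8)  # MSB优先
--
--             if byte_index < len(char_data):
--                 if char_data[byte_index] & (1 << bit_offset):
--                     bitmap[y][x] = True
--
--     return bitmap
-- ===== SOURCE B (Python) =====
-- def bytes_to_bitmap(char_data, char_width, char_height):
--     """Build the bitmap row by row: expand each row's bytes into MSB-first
--     bit booleans, concatenate them, and truncate to char_width."""
--     bytes_per_row = (char_width + 7) // 8
--     bitmap = []
--     for y in range(char_height):
--         row_start = y * bytes_per_row
--         bits = []
--         for i in range(bytes_per_row):
--             idx = row_start + i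
--             byte = char_data[idx] if 0 <= idx < len(char_data) else 0
--             bits.extend(byte & (1 << (7 - k)) != 0 for k in range(8))
--         bitmap.append(bits[:char_width])
--     return bitmap
-- ===== Notes on version B (the rewrite author's own statement) =====
-- stated objective: simpler
-- what changed: B builds each row at once by expanding the row's bytes into MSB-first bit lists and truncating to char_width, instead of A's per-pixel byte/offset addressing into a pre-allocated mutable bitmap.
import Mathlib
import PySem

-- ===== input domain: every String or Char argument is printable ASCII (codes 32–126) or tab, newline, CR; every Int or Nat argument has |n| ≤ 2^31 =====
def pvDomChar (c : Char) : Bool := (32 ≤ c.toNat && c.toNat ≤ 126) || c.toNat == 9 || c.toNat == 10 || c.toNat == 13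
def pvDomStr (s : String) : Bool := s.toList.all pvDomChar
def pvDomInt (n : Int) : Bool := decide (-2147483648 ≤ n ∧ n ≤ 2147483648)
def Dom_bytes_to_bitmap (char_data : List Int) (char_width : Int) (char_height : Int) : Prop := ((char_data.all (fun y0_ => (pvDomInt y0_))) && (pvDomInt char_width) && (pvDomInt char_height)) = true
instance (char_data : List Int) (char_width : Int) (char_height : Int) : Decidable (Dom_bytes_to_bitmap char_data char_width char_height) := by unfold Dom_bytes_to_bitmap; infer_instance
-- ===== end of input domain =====

-- B builds each row at once by expanding the row's bytes into MSB-first bit lists and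
-- truncating to char_width, instead of A's per-pixel byte/offset addressing (objective: simpler).

-- ===== PORT A =====
def bytes_to_bitmap (char_data : List Int) (char_width : Int) (char_height : Int) : List (List Bool) :=
  let bytes_per_row := PySem.Int.floordiv (char_width + 7) 8
  let bitmap := (PySem.List.pyRange 0 char_height 1).map
    (fun _ => List.replicate char_width.toNat false)
  (PySem.List.pyRange 0 char_height 1).foldl (fun bitmap y =>
    let row_start := y * bytes_per_row
    (PySem.List.pyRange 0 char_width 1).foldl (fun bitmap x =>
      let byte_index := row_start + PySem.Int.floordiv x 8
      let bit_offset := 7 - PySem.Int.mod x 8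
      if byte_index < (char_data.length : Int) ∧
          PySem.Int.band (PySem.List.pyGetD char_data byte_index 0) ((1:Int) <<< bit_offset.toNat) ≠ 0 then
        bitmap.modify y.toNat (fun row => row.set x.toNat true)
      else bitmap) bitmap) bitmap

-- ===== PORT B =====
def bytes_to_bitmap_alt (char_data : List Int) (char_width : Int) (char_height : Int) : List (List Bool) :=
  let bytes_per_row := PySem.Int.floordiv (char_width + 7) 8
  (PySem.List.pyRange 0 char_height 1).foldl (fun bitmap y =>
    let row_start := y * bytes_per_row
    let bits := (PySem.List.pyRange 0 bytes_per_row 1).foldl (fun bits i =>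
      let idx := row_start + i
      let byte := if 0 ≤ idx ∧ idx < (char_data.length : Int) then PySem.List.pyGetD char_data idx 0 else 0
      bits ++ (PySem.List.pyRange 0 8 1).map
        (fun k => PySem.Int.band byte ((1:Int) <<< (7 - k).toNat) != 0)) []
    bitmap ++ [PySem.List.slice bits none (some char_width)]) []

-- ===== PRECONDITION & SPEC =====
def Spec_bytes_to_bitmap (char_data : List Int) (char_width : Int) (char_height : Int) (out : List (List Bool)) : Prop := out = bytes_to_bitmap_alt char_data char_width char_height
instance (char_data : List Int) (char_width : Int) (char_height : Int) (out : List (List Bool)) : Decidable (Spec_bytes_to_bitmap char_data char_width char_height out) := by unfold Spec_bytes_to_bitmap; infer_instance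

-- ===== CLAIM (what is proved, stated in full; the proofs are below) =====
def Claim_equal_bytes_to_bitmap : Prop := ∀ (char_data : List Int) (char_width : Int) (char_height : Int), Dom_bytes_to_bitmap char_data char_width char_height → Spec_bytes_to_bitmap char_data char_width char_height (bytes_to_bitmap char_data char_width char_height)

-- ===== LEMMAS AND PROOFS =====

-- the common pixel value: row starting at byte index rs, pixel x (MSB-first within each byte)
def pvPix (cd : List Int) (rs : Int) (x : Nat) : Bool :=
  decide (rs + ((x / 8 : Nat) : Int) < (cd.length : Int) ∧
    PySem.Int.band (PySem.List.pyGetD cd (rs + ((x / 8 : Nat) : Int)) 0) ((1:Int) <<< (7 - x % 8)) ≠ 0)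

theorem pv_bne (a : Int) : (a != 0) = decide (a ≠ 0) := by
  cases h : decide (a ≠ 0) <;> simp_all

theorem pv_fdiv_cast (x : Nat) : PySem.Int.floordiv (x : Int) 8 = ((x / 8 : Nat) : Int) := by
  simp [PySem.Int.floordiv, Int.fdiv_eq_ediv]

theorem pv_off_cast (x : Nat) : (7 - PySem.Int.mod (x : Int) 8).toNat = 7 - x % 8 := by
  have : PySem.Int.mod (x : Int) 8 = ((x % 8 : Nat) : Int) := by
    simp [PySem.Int.mod, Int.fmod_eq_emod]
  rw [this]; omega

-- 8 * ((w+7) fdiv 8) covers w and no more than w+7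
theorem pv_bpr_bounds (cw : Int) :
    cw ≤ 8 * PySem.Int.floordiv (cw + 7) 8 ∧ 8 * PySem.Int.floordiv (cw + 7) 8 ≤ cw + 7 := by
  have h1 : PySem.Int.floordiv (cw + 7) 8 = (cw + 7) / 8 := by
    simp [PySem.Int.floordiv, Int.fdiv_eq_ediv]
  have h2 := Int.mul_ediv_add_emod (cw + 7) 8
  have h3 := Int.emod_nonneg (cw + 7) (by norm_num : (8:Int) ≠ 0)
  have h4 := Int.emod_lt_of_pos (cw + 7) (by norm_num : (0:Int) < 8)
  omega

theorem pv_modify_modify {α : Type} (l : List α) (i : Nat) (f g : α → α) :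
    (l.modify i f).modify i g = l.modify i (fun r => g (f r)) := by
  induction l generalizing i with
  | nil => simp
  | cons a l ih => cases i <;> simp [ih]

theorem pv_modify_id {α : Type} (l : List α) (i : Nat) :
    l.modify i (fun r => r) = l := by
  induction l generalizing i with
  | nil => simp
  | cons a l ih => cases i <;> simp [ih]

theorem pv_modify_append {α : Type} (A : List α) (r : α) (t : List α) (f : α → α) :
    (A ++ r :: t).modify A.length f = A ++ f r :: t := by
  induction A with
  | nil => simp
  | cons a A ih => simp [ih]

theorem pv_modify_append' {α : Type} (A : List α) (r : α) (t : List α) (f : α → α) (m : Nat)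
    (h : A.length = m) : (A ++ r :: t).modify m f = A ++ f r :: t := by
  subst h; exact pv_modify_append A r t f

theorem pv_set_append (A : List Bool) (r : Bool) (t : List Bool) (v : Bool) :
    (A ++ r :: t).set A.length v = A ++ v :: t := by
  induction A with
  | nil => simp
  | cons a A ih => simp [ih]

theorem pv_set_append' (A : List Bool) (r : Bool) (t : List Bool) (v : Bool) (m : Nat)
    (h : A.length = m) : (A ++ r :: t).set m v = A ++ v :: t := by
  subst h; exact pv_set_append A r t v

-- A's inner loop only mutates row y: it is a modify at y of a fold over that row
theorem pv_fold_modify (xs : List Int) (yn : Nat)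
    (c : Int → Prop) [DecidablePred c] (g : Int → List Bool → List Bool)
    (bm : List (List Bool)) :
    xs.foldl (fun bm x => if c x then bm.modify yn (g x) else bm) bm
      = bm.modify yn (fun row => xs.foldl (fun row x => if c x then g x row else row) row) := by
  induction xs generalizing bm with
  | nil => simp [pv_modify_id]
  | cons x xs ih =>
      by_cases hc : c x <;> simp [hc, ih, pv_modify_modify]

-- A's per-row fold realises the map of the condition over the row
theorem pv_rowfold (c : Int → Prop) [DecidablePred c] (n : Nat) :
    ∀ m, m ≤ n →
    (PySem.List.pyRange 0 (m : Int) 1).foldl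
        (fun row x => if c x then row.set x.toNat true else row) (List.replicate n false)
      = (List.range m).map (fun (k : Nat) => decide (c (k : Int))) ++ List.replicate (n - m) false := by
  intro m
  induction m with
  | zero => intro _; simp [PySem.List.pyRange_one_eq_nil]
  | succ m ih =>
      intro hm
      have h1 : ((m + 1 : Nat) : Int) = (m : Int) + 1 := by push_cast; ring
      rw [h1, PySem.List.pyRange_one_succ_right (by positivity), List.foldl_append,
        ih (by omega)]
      have hrep : n - m = (n - (m + 1)) + 1 := by omega
      have hlen : ((List.range m).map (fun (k : Nat) => decide (c (k : Int)))).length = m := by simp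
      rw [hrep, List.replicate_succ, List.foldl_cons, List.foldl_nil, List.range_succ,
        List.map_append]
      by_cases hc : c (m : Int)
      · rw [if_pos hc]
        have : ((m : Int)).toNat = m := by omega
        rw [this, pv_set_append' _ _ _ _ _ hlen]
        simp [hc]
      · rw [if_neg hc]
        simp [hc]

-- A's outer loop builds the rows independently
theorem pv_outerfold (R : Int → List Bool → List Bool) (ir : List Bool) (hn : Nat) :
    ∀ m, m ≤ hn →
    (PySem.List.pyRange 0 (m : Int) 1).foldl
        (fun bm y => bm.modify y.toNat (R y)) (List.replicate hn ir)
      = (List.range m).map (fun (y : Nat) => R (y : Int) ir) ++ List.replicate (hn - m) ir := by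
  intro m
  induction m with
  | zero => intro _; simp [PySem.List.pyRange_one_eq_nil]
  | succ m ih =>
      intro hm
      have h1 : ((m + 1 : Nat) : Int) = (m : Int) + 1 := by push_cast; ring
      rw [h1, PySem.List.pyRange_one_succ_right (by positivity), List.foldl_append,
        ih (by omega), List.foldl_cons, List.foldl_nil]
      have hrep : hn - m = (hn - (m + 1)) + 1 := by omega
      have hlen : ((List.range m).map (fun (y : Nat) => R (y : Int) ir)).length = m := by simp
      rw [hrep, List.replicate_succ, List.range_succ, List.map_append]
      have : ((m : Int)).toNat = m := by omega
      rw [this, pv_modify_append' _ _ _ _ _ hlen]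
      simp

theorem pv_slice_nil {α : Type} (a b : Option Int) : PySem.List.slice ([] : List α) a b = [] := by
  rw [List.eq_nil_iff_forall_not_mem]
  intro x hx
  have h2 := PySem.List.mem_of_mem_slice _ _ _ hx
  simp at h2

-- flattening uniform 8-bit chunks is indexing by x/8 and x%8
theorem pv_flat (n : Nat) (f : Nat → Nat → Bool) :
    (List.range n).flatMap (fun i => (List.range 8).map (f i))
      = (List.range (8 * n)).map (fun x => f (x / 8) (x % 8)) := by
  induction n with
  | zero => simp
  | succ n ih =>
      rw [show List.range (n+1) = List.range n ++ [n] from List.range_succ,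
        List.flatMap_append, ih]
      have h8 : 8 * (n + 1) = 8 * n + 8 := by ring
      rw [h8, List.range_add, List.map_append]
      congr 1
      simp only [List.flatMap_cons, List.flatMap_nil, List.append_nil, List.map_map]
      apply List.map_congr_left
      intro k hk
      have hk8 : k < 8 := List.mem_range.mp hk
      have hd : (8 * n + k) / 8 = n := by omega
      have hm : (8 * n + k) % 8 = k := by omega
      simp [hd, hm]

-- pyRange 0 n 1 for step one is the cast of List.range
theorem pv_pyRange_toNat (n : Int) :
    PySem.List.pyRange 0 n 1 = (List.range n.toNat).map (fun (k : Nat) => (k : Int)) := by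
  rw [PySem.List.pyRange_one]
  simp

-- one MSB-first byte expansion, over Nat bit positions
theorem pv_chunk (b : Int) :
    (PySem.List.pyRange 0 8 1).map (fun k => PySem.Int.band b ((1:Int) <<< (7 - k).toNat) != 0)
      = (List.range 8).map (fun (k : Nat) => PySem.Int.band b ((1:Int) <<< (7 - k)) != 0) := by
  rfl

theorem pv_band_zero (x : Int) : PySem.Int.band 0 x = 0 := by
  simp [PySem.Int.band]

-- ----- the common row: A's per-row fold gives exactly the pixel map -----
theorem pv_rowA (cd : List Int) (cw rs : Int) :
    (PySem.List.pyRange 0 cw 1).foldl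
      (fun row x =>
        if (rs + PySem.Int.floordiv x 8 < (cd.length : Int) ∧
            PySem.Int.band (PySem.List.pyGetD cd (rs + PySem.Int.floordiv x 8) 0)
              ((1:Int) <<< (7 - PySem.Int.mod x 8).toNat) ≠ 0) then
          row.set x.toNat true
        else row)
      (List.replicate cw.toNat false)
      = (List.range cw.toNat).map (pvPix cd rs) := by
  by_cases hcw : 0 ≤ cw
  · have hpy : PySem.List.pyRange 0 cw 1 = PySem.List.pyRange 0 ((cw.toNat : Nat) : Int) 1 := by
      rw [Int.toNat_of_nonneg hcw]
    rw [hpy]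
    rw [pv_rowfold (fun x => rs + PySem.Int.floordiv x 8 < (cd.length : Int) ∧
        PySem.Int.band (PySem.List.pyGetD cd (rs + PySem.Int.floordiv x 8) 0)
          ((1:Int) <<< (7 - PySem.Int.mod x 8).toNat) ≠ 0) cw.toNat cw.toNat (le_refl _)]
    simp only [Nat.sub_self, List.replicate_zero, List.append_nil]
    apply List.map_congr_left
    intro k _
    unfold pvPix
    rw [decide_eq_decide]
    rw [pv_fdiv_cast, pv_off_cast]
  · have h0 : cw.toNat = 0 := by omega
    rw [PySem.List.pyRange_one_eq_nil (by omega), h0]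
    simp

-- ----- B's row: byte expansion then truncation gives the same pixel map -----
theorem pv_rowB (cd : List Int) (cw rs : Int) (hrs : 0 < cw → 0 ≤ rs) :
    PySem.List.slice
      ((PySem.List.pyRange 0 (PySem.Int.floordiv (cw + 7) 8) 1).foldl
        (fun bits i =>
          bits ++ (PySem.List.pyRange 0 8 1).map
            (fun k => PySem.Int.band
              (if 0 ≤ rs + i ∧ rs + i < (cd.length : Int) then PySem.List.pyGetD cd (rs + i) 0 else 0)
              ((1:Int) <<< (7 - k).toNat) != 0)) [])
      none (some cw)
      = (List.range cw.toNat).map (pvPix cd rs) := by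
  have hb := pv_bpr_bounds cw
  by_cases hcw : 0 < cw
  · have hrs' := hrs hcw
    have hbpr : 0 < PySem.Int.floordiv (cw + 7) 8 := by omega
    simp only [pv_chunk]
    rw [PySem.List.foldl_append_eq_flatMap]
    rw [List.nil_append, pv_pyRange_toNat]
    rw [List.flatMap_map]
    rw [pv_flat]
    rw [PySem.List.slice_to _ (by omega)]
    rw [← List.map_take, List.take_range]
    have hmin : min cw.toNat (8 * (PySem.Int.floordiv (cw + 7) 8).toNat) = cw.toNat := by omega
    rw [hmin]
    apply List.map_congr_left
    intro x hx
    have hidx0 : 0 ≤ rs + ((x / 8 : Nat) : Int) := by positivity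
    unfold pvPix
    by_cases hin : rs + ((x / 8 : Nat) : Int) < (cd.length : Int)
    · rw [if_pos ⟨hidx0, hin⟩, pv_bne, decide_eq_decide]
      exact ⟨fun h => ⟨hin, h⟩, fun h => h.2⟩
    · rw [if_neg (by tauto), pv_band_zero, pv_bne, decide_eq_decide]
      exact ⟨fun h => absurd rfl h, fun h => absurd h.1 hin⟩
  · have h0 : cw.toNat = 0 := by omega
    have hbpr : PySem.Int.floordiv (cw + 7) 8 ≤ 0 := by omega
    rw [PySem.List.pyRange_one_eq_nil hbpr]
    rw [List.foldl_nil, pv_slice_nil, h0]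
    rfl

-- ----- normal form for A -----
theorem pv_A_norm (cd : List Int) (cw ch : Int) :
    bytes_to_bitmap cd cw ch
      = (List.range ch.toNat).map
          (fun (y : Nat) => (List.range cw.toNat).map (pvPix cd ((y : Int) * PySem.Int.floordiv (cw + 7) 8))) := by
  have hA : bytes_to_bitmap cd cw ch
      = (PySem.List.pyRange 0 ch 1).foldl (fun bitmap y =>
          (PySem.List.pyRange 0 cw 1).foldl (fun bitmap x =>
            if (y * PySem.Int.floordiv (cw + 7) 8 + PySem.Int.floordiv x 8 < (cd.length : Int) ∧
                PySem.Int.band (PySem.List.pyGetD cd (y * PySem.Int.floordiv (cw + 7) 8 + PySem.Int.floordiv x 8) 0)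
                  ((1:Int) <<< (7 - PySem.Int.mod x 8).toNat) ≠ 0) then
              bitmap.modify y.toNat (fun row => row.set x.toNat true)
            else bitmap) bitmap)
          ((PySem.List.pyRange 0 ch 1).map (fun _ => List.replicate cw.toNat false)) := rfl
  rw [hA]
  have hinit : (PySem.List.pyRange 0 ch 1).map (fun _ => List.replicate cw.toNat false)
      = List.replicate ch.toNat (List.replicate cw.toNat false) := by
    rw [pv_pyRange_toNat, List.map_map]
    simp [Function.comp_def]
  rw [hinit]
  have hstep : (fun (bitmap : List (List Bool)) (y : Int) =>
      (PySem.List.pyRange 0 cw 1).foldl (fun bitmap x =>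
        if (y * PySem.Int.floordiv (cw + 7) 8 + PySem.Int.floordiv x 8 < (cd.length : Int) ∧
            PySem.Int.band (PySem.List.pyGetD cd (y * PySem.Int.floordiv (cw + 7) 8 + PySem.Int.floordiv x 8) 0)
              ((1:Int) <<< (7 - PySem.Int.mod x 8).toNat) ≠ 0) then
          bitmap.modify y.toNat (fun row => row.set x.toNat true)
        else bitmap) bitmap)
      = (fun (bm : List (List Bool)) (y : Int) => bm.modify y.toNat
          ((fun (yi : Int) (row : List Bool) =>
            (PySem.List.pyRange 0 cw 1).foldl (fun row x =>
              if (yi * PySem.Int.floordiv (cw + 7) 8 + PySem.Int.floordiv x 8 < (cd.length : Int) ∧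
                  PySem.Int.band (PySem.List.pyGetD cd (yi * PySem.Int.floordiv (cw + 7) 8 + PySem.Int.floordiv x 8) 0)
                    ((1:Int) <<< (7 - PySem.Int.mod x 8).toNat) ≠ 0) then
                row.set x.toNat true
              else row) row) y)) := by
    funext bm y
    rw [pv_fold_modify]
  rw [hstep]
  by_cases hch : 0 ≤ ch
  · have hc : PySem.List.pyRange 0 ch 1 = PySem.List.pyRange 0 ((ch.toNat : Nat) : Int) 1 := by
      rw [Int.toNat_of_nonneg hch]
    rw [hc, pv_outerfold _ _ ch.toNat ch.toNat (le_refl _)]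
    simp only [Nat.sub_self, List.replicate_zero, List.append_nil]
    apply List.map_congr_left
    intro y _
    exact pv_rowA cd cw ((y : Int) * PySem.Int.floordiv (cw + 7) 8)
  · rw [show PySem.List.pyRange 0 ch 1 = [] from PySem.List.pyRange_one_eq_nil (by omega)]
    have h0 : ch.toNat = 0 := by omega
    rw [h0]
    simp

-- ----- normal form for B -----
theorem pv_B_norm (cd : List Int) (cw ch : Int) :
    bytes_to_bitmap_alt cd cw ch
      = (List.range ch.toNat).map
          (fun (y : Nat) => (List.range cw.toNat).map (pvPix cd ((y : Int) * PySem.Int.floordiv (cw + 7) 8))) := by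
  have hB : bytes_to_bitmap_alt cd cw ch
      = (PySem.List.pyRange 0 ch 1).foldl (fun bitmap y =>
          bitmap ++ [PySem.List.slice
            ((PySem.List.pyRange 0 (PySem.Int.floordiv (cw + 7) 8) 1).foldl
              (fun bits i =>
                bits ++ (PySem.List.pyRange 0 8 1).map
                  (fun k => PySem.Int.band
                    (if 0 ≤ y * PySem.Int.floordiv (cw + 7) 8 + i ∧
                        y * PySem.Int.floordiv (cw + 7) 8 + i < (cd.length : Int) then
                      PySem.List.pyGetD cd (y * PySem.Int.floordiv (cw + 7) 8 + i) 0
                    else 0)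
                    ((1:Int) <<< (7 - k).toNat) != 0)) [])
            none (some cw)]) [] := rfl
  rw [hB]
  rw [PySem.List.foldl_append_singleton_eq_map]
  rw [List.nil_append,
    show PySem.List.pyRange 0 ch 1 = (List.range ch.toNat).map (fun (k : Nat) => (k : Int)) from
      pv_pyRange_toNat ch,
    List.map_map]
  apply List.map_congr_left
  intro y hy
  have hrs : 0 < cw → 0 ≤ (y : Int) * PySem.Int.floordiv (cw + 7) 8 := by
    intro hcw
    have := (pv_bpr_bounds cw).1
    have hbpr : 0 ≤ PySem.Int.floordiv (cw + 7) 8 := by omega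
    positivity
  exact pv_rowB cd cw ((y : Int) * PySem.Int.floordiv (cw + 7) 8) hrs

-- ===== VERDICT (by name: the statement is the Claim_ definition above) =====
theorem bytes_to_bitmap_spec : Claim_equal_bytes_to_bitmap := by
  intro cd cw ch _
  unfold Spec_bytes_to_bitmap
  rw [pv_A_norm, pv_B_norm]
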